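-- pv_equiv track=rewrite | github.com/PSmaruj/akita_semifreddo | optimizations/boundary_suppression/analysis/boundary_suppression_bbox_shuffling.py | find_bbox_hits
-- ===== SOURCE A (Python) =====
-- BBOX_CONSENSUS = [
--     {"A", "G"},              # R
--     {"G"},                   # G
--     {"T"},                   # T
--     {"T"},                   # T
--     {"C"},                   # C
--     {"A", "G"},              # R
--     {"A", "C", "G", "T"},   # N
--     {"A", "G"},              # R
--     {"T"},                   # T
--     {"C"},                   # C
--     {"C"},                   # C
-- ]
--
-- BBOX_LEN = len(BBOX_CONSENSUS)  # 11
--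
-- def count_mismatches(seq, consensus=BBOX_CONSENSUS):
--     """Count mismatches between a sequence string and the B-box consensus."""
--     mismatches = 0
--     for i, allowed in enumerate(consensus):
--         if seq[i].upper() not in allowed:
--             mismatches += 1
--     return mismatches
--
-- def find_bbox_hits(seq_str, max_mismatches=3):
--     """
--     Scan a DNA string for B-box-like motifs (fuzzy matching).
--
--     Returns:
--         List of merged (start, end) tuples (0-indexed, end exclusive).
--     """
--     hits = []
--     for i in range(len(seq_str) - BBOX_LEN + 1):
--         if count_mismatches(seq_str[i:i + BBOX_LEN]) <= max_mismatches:
--             hits.append((i, i + BBOX_LEN))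
--     if not hits:
--         return hits
--     merged = [hits[0]]
--     for start, end in hits[1:]:
--         if start <= merged[-1][1]:
--             merged[-1] = (merged[-1][0], max(merged[-1][1], end))
--         else:
--             merged.append((start, end))
--     return merged
-- ===== SOURCE B (Python) =====
-- BBOX_CONSENSUS = [
--     {"A", "G"},              # R
--     {"G"},                   # G
--     {"T"},                   # T
--     {"T"},                   # T
--     {"C"},                   # C
--     {"A", "G"},              # R
--     {"A", "C", "G", "T"},   # N
--     {"A", "G"},              # R
--     {"T"},                   # T
--     {"C"},                   # C
--     {"C"},                   # C
-- ]
--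
-- BBOX_LEN = len(BBOX_CONSENSUS)  # 11
--
-- def count_mismatches(seq, consensus=BBOX_CONSENSUS):
--     """Count mismatches between a sequence string and the B-box consensus."""
--     mismatches = 0
--     for i, allowed in enumerate(consensus):
--         if seq[i].upper() not in allowed:
--             mismatches += 1
--     return mismatches
--
-- def find_bbox_hits(seq_str, max_mismatches=3):
--     """Coverage-array formulation: a position j is covered iff some matching
--     window contains it; the answer is the list of maximal runs of covered
--     positions (touching windows produce one contiguous run, so runs coincide
--     with the merged intervals)."""
--     n = len(seq_str)
--     covered = [
--         any(count_mismatches(seq_str[s:s + BBOX_LEN]) <= max_mismatches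
--             for s in range(max(0, j - BBOX_LEN + 1), min(j + 1, n - BBOX_LEN + 1)))
--         for j in range(n)
--     ]
--     out = []
--     j = 0
--     while j < n:
--         if not covered[j]:
--             j += 1
--             continue
--         start = j
--         while j < n and covered[j]:
--             j += 1
--         out.append((start, j))
--     return out
-- ===== Notes on version B (the rewrite author's own statement) =====
-- stated objective: alternative
-- what changed: B never builds or merges (start,end) interval pairs: it computes a per-position boolean coverage array (position j is covered iff some matching window contains j) and then reads off the maximal runs of covered positions, which coincide with A's merged intervals because touching fixed-length windows cover a contiguous block.
import Mathlib
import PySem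

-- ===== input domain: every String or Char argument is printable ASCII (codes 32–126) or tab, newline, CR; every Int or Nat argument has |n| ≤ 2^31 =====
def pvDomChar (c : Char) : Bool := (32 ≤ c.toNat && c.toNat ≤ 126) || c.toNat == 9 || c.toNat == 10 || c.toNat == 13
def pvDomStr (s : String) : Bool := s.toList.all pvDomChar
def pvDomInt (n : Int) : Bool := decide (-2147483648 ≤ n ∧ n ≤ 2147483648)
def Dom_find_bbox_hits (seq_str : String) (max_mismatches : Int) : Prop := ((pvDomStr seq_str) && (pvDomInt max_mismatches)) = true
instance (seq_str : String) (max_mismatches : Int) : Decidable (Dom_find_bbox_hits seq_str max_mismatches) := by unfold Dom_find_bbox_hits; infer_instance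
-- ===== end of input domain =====

-- B drops A's interval merging entirely: it computes a per-position coverage array and
-- reads off the maximal runs of covered positions (alternative algorithm, same cost).

-- ===== PORT A =====
-- BBOX_CONSENSUS: Python sets of single characters → lists of the distinct allowed chars.
def bboxConsensus : List (List Char) :=
  [['A','G'], ['G'], ['T'], ['T'], ['C'], ['A','G'], ['A','C','G','T'], ['A','G'], ['T'], ['C'], ['C']]

-- count_mismatches: loop over enumerate(consensus); seq[i] via pyGet? (none = IndexError,
-- unreachable: both ports only pass slices of length 11); .upper() of one ASCII char = upperChar.
def countMismatches (seq : List Char) : Int :=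
  (PySem.List.enumerate bboxConsensus 0).foldl
    (fun mismatches p =>
      match PySem.List.pyGet? seq p.1 with
      | some c => if PySem.Chars.upperChar c ∈ p.2 then mismatches else mismatches + 1
      | none => mismatches) 0

-- the body of A's merge loop: merged kept in REVERSE (head = merged[-1]), reversed at the end
def mergeStepA (rev : List (Int × Int)) (se : Int × Int) : List (Int × Int) :=
  match rev with
  | m :: t => if se.1 ≤ m.2 then (m.1, max m.2 se.2) :: t else se :: m :: t
  | [] => [se]

def find_bbox_hits (seq_str : String) (max_mismatches : Int) : List (Int × Int) :=
  let s := seq_str.toList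
  let hits := (PySem.List.pyRange 0 ((s.length : Int) - 11 + 1) 1).foldl
    (fun acc i =>
      if decide (countMismatches (PySem.List.slice s (some i) (some (i + 11))) ≤ max_mismatches)
      then acc ++ [(i, i + 11)] else acc) []
  match hits with
  | [] => []
  | h :: rest => (rest.foldl mergeStepA [h]).reverse

-- ===== PORT B =====
-- covered[j] of Source B: any matching window start s in [max(0, j-10), min(j+1, n-10)) contains j
def coveredAt (s : List Char) (m : Int) (j : Int) : Bool :=
  (PySem.List.pyRange (max 0 (j - 11 + 1)) (min (j + 1) ((s.length : Int) - 11 + 1)) 1).any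
    (fun i => decide (countMismatches (PySem.List.slice s (some i) (some (i + 11))) ≤ m))

-- Source B's two while loops walking index j over `covered`: mutual structural scan,
-- scanRuns = outside a run, scanRun = inside a run that started at f
mutual
def scanRuns (j : Int) : List Bool → List (Int × Int)
  | [] => []
  | b :: t => if b then scanRun j (j + 1) t else scanRuns (j + 1) t
def scanRun (f j : Int) : List Bool → List (Int × Int)
  | [] => [(f, j)]
  | b :: t => if b then scanRun f (j + 1) t else (f, j) :: scanRuns (j + 1) t
end

def find_bbox_hits_alt (seq_str : String) (max_mismatches : Int) : List (Int × Int) :=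
  let s := seq_str.toList
  let covered := (PySem.List.pyRange 0 (s.length : Int) 1).map (coveredAt s max_mismatches)
  scanRuns 0 covered

-- ===== PRECONDITION & SPEC =====
def Spec_find_bbox_hits (seq_str : String) (max_mismatches : Int) (out : List (Int × Int)) : Prop := out = find_bbox_hits_alt seq_str max_mismatches
instance (seq_str : String) (max_mismatches : Int) (out : List (Int × Int)) : Decidable (Spec_find_bbox_hits seq_str max_mismatches out) := by unfold Spec_find_bbox_hits; infer_instance

-- ===== CLAIM (what is proved, stated in full; the proofs are below) =====
def Claim_equal_find_bbox_hits : Prop := ∀ (seq_str : String) (max_mismatches : Int), Dom_find_bbox_hits seq_str max_mismatches → Spec_find_bbox_hits seq_str max_mismatches (find_bbox_hits seq_str max_mismatches)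

-- ===== LEMMAS AND PROOFS =====

-- canonical merged groups of a strictly increasing start list (proof-only intermediary)
def groupsGo (f p : Int) : List Int → List (Int × Int)
  | [] => [(f, p + 11)]
  | s :: rest => if s ≤ p + 11 then groupsGo f s rest else (f, p + 11) :: groupsGo s s rest

-- A's merge fold equals groupsGo
lemma mergeA_eq_groupsGo (l : List Int) : ∀ (f p : Int) (out : List (Int × Int)),
    (∀ x ∈ l, p < x) → l.Pairwise (· < ·) →
    ((l.map (fun i => (i, i + 11))).foldl mergeStepA ((f, p + 11) :: out)).reverse
      = out.reverse ++ groupsGo f p l := by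
  induction l with
  | nil => intro f p out _ _; simp [groupsGo]
  | cons s l ih =>
    intro f p out hall hpw
    have hps : p < s := hall s (by simp)
    have hall' : ∀ x ∈ l, s < x := fun x hx => (List.pairwise_cons.mp hpw).1 x hx
    have hpw' : l.Pairwise (· < ·) := (List.pairwise_cons.mp hpw).2
    simp only [List.map_cons, List.foldl_cons, groupsGo]
    by_cases hle : s ≤ p + 11
    · have h1 : mergeStepA ((f, p + 11) :: out) (s, s + 11) = (f, s + 11) :: out := by
        simp only [mergeStepA]
        rw [if_pos (by omega)]
        congr 2
        omega
      rw [h1, if_pos hle]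
      exact ih f s out hall' hpw'
    · have h1 : mergeStepA ((f, p + 11) :: out) (s, s + 11)
          = (s, s + 11) :: (f, p + 11) :: out := by
        simp only [mergeStepA]
        rw [if_neg (by omega)]
      rw [h1, if_neg hle]
      have := ih s s ((f, p + 11) :: out) hall' hpw'
      simpa using this

-- coverage of groupsGo: the groups cover exactly [f, p+11) plus the windows of the rest
lemma covG_groupsGo (l : List Int) : ∀ (f p j : Int), f ≤ p →
    (∀ x ∈ l, p < x) → l.Pairwise (· < ·) →
    ((∃ fe ∈ groupsGo f p l, fe.1 ≤ j ∧ j < fe.2) ↔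
      ((f ≤ j ∧ j < p + 11) ∨ ∃ i ∈ l, i ≤ j ∧ j < i + 11)) := by
  induction l with
  | nil => intro f p j _ _ _; simp [groupsGo]
  | cons s l ih =>
    intro f p j hfp hall hpw
    have hps : p < s := hall s (by simp)
    have hall' : ∀ x ∈ l, s < x := fun x hx => (List.pairwise_cons.mp hpw).1 x hx
    have hpw' : l.Pairwise (· < ·) := (List.pairwise_cons.mp hpw).2
    simp only [groupsGo]
    by_cases hle : s ≤ p + 11
    · rw [if_pos hle, ih f s j (by omega) hall' hpw']
      constructor
      · rintro (h | h)
        · by_cases hj : j < p + 11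
          · exact Or.inl ⟨h.1, hj⟩
          · exact Or.inr ⟨s, by simp, by omega⟩
        · exact Or.inr (by simpa using Or.inr h)
      · rintro (h | h)
        · exact Or.inl (by omega)
        · rcases h with ⟨i, hi, hij⟩
          rcases List.mem_cons.mp hi with rfl | hi
          · exact Or.inl (by omega)
          · exact Or.inr ⟨i, hi, hij⟩
    · rw [if_neg hle]
      have hrest := ih s s j le_rfl hall' hpw'
      constructor
      · rintro ⟨fe, hfe, hj⟩
        rcases List.mem_cons.mp hfe with rfl | hfe
        · exact Or.inl hj
        · rcases hrest.mp ⟨fe, hfe, hj⟩ with h | ⟨i, hi, hij⟩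
          · exact Or.inr ⟨s, List.mem_cons.mpr (Or.inl rfl), by omega⟩
          · exact Or.inr ⟨i, List.mem_cons.mpr (Or.inr hi), hij⟩
      · rintro (h | ⟨i, hi, hij⟩)
        · exact ⟨(f, p + 11), List.mem_cons.mpr (Or.inl rfl), h⟩
        · rcases List.mem_cons.mp hi with rfl | hi
          · obtain ⟨fe, hfe, hj⟩ := hrest.mpr (Or.inl (by omega))
            exact ⟨fe, List.mem_cons.mpr (Or.inr hfe), hj⟩
          · obtain ⟨fe, hfe, hj⟩ := hrest.mpr (Or.inr ⟨i, hi, hij⟩)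
            exact ⟨fe, List.mem_cons.mpr (Or.inr hfe), hj⟩

-- well-separated interval lists: within [p, n], nonempty, strictly separated (next start > prev end)
def SepIv : Int → Int → List (Int × Int) → Prop
  | _, _, [] => True
  | p, n, fe :: G => p ≤ fe.1 ∧ fe.1 < fe.2 ∧ fe.2 ≤ n ∧ SepIv (fe.2 + 1) n G

lemma Sep_mono {p q n : Int} {G : List (Int × Int)} (h : q ≤ p) (hs : SepIv p n G) : SepIv q n G := by
  cases G with
  | nil => trivial
  | cons fe G => exact ⟨by have := hs.1; omega, hs.2.1, hs.2.2.1, hs.2.2.2⟩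

lemma Sep_not_cov {n : Int} (G : List (Int × Int)) : ∀ (q j : Int), SepIv q n G → j < q →
    ¬ (∃ fe ∈ G, fe.1 ≤ j ∧ j < fe.2) := by
  induction G with
  | nil => intro q j _ _; simp
  | cons fe G ih =>
    intro q j hs hj
    obtain ⟨h0, hlt, hle, hs'⟩ := hs
    rintro ⟨ge, hge, h1, h2⟩
    rcases List.mem_cons.mp hge with rfl | hge
    · omega
    · exact ih (fe.2 + 1) j hs' (by omega) ⟨ge, hge, h1, h2⟩

lemma Sep_nil_of_ge {n p : Int} {G : List (Int × Int)} (hs : SepIv p n G) (h : n ≤ p) : G = [] := by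
  cases G with
  | nil => rfl
  | cons fe G => exact absurd hs.1 (by have := hs.2.1; have := hs.2.2.1; omega)

lemma groupsGo_sep (n : Int) (l : List Int) : ∀ (f p : Int), f ≤ p → p + 11 ≤ n →
    (∀ x ∈ l, p < x ∧ x + 11 ≤ n) → l.Pairwise (· < ·) → SepIv f n (groupsGo f p l) := by
  induction l with
  | nil => intro f p hfp hpn _ _; exact ⟨le_rfl, by omega, hpn, trivial⟩
  | cons s l ih =>
    intro f p hfp hpn hall hpw
    have hs := hall s (by simp)
    have hall' : ∀ x ∈ l, s < x ∧ x + 11 ≤ n := fun x hx =>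
      ⟨(List.pairwise_cons.mp hpw).1 x hx, (hall x (by simp [hx])).2⟩
    have hpw' : l.Pairwise (· < ·) := (List.pairwise_cons.mp hpw).2
    simp only [groupsGo]
    by_cases hle : s ≤ p + 11
    · rw [if_pos hle]; exact ih f s (by omega) (by omega) hall' hpw'
    · rw [if_neg hle]
      exact ⟨le_rfl, by omega, hpn,
        Sep_mono (by omega) (ih s s le_rfl (by omega) hall' hpw')⟩

-- main scan lemma: run extraction over a coverage function matching a separated group list
lemma scan_main (n : Int) (cov : Int → Bool) : ∀ (k : Nat) (p : Int), (n - p).toNat ≤ k →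
    (∀ G, SepIv p n G →
       (∀ j, p ≤ j → j < n → (cov j = true ↔ ∃ fe ∈ G, fe.1 ≤ j ∧ j < fe.2)) →
       scanRuns p ((PySem.List.pyRange p n 1).map cov) = G)
    ∧ (∀ (f e : Int) (G' : List (Int × Int)), p ≤ e → f < e → e ≤ n → SepIv (e + 1) n G' →
        (∀ j, p ≤ j → j < n → (cov j = true ↔ (j < e ∨ ∃ fe ∈ G', fe.1 ≤ j ∧ j < fe.2))) →
        scanRun f p ((PySem.List.pyRange p n 1).map cov) = (f, e) :: G') := by
  intro k
  induction k with
  | zero =>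
    intro p hk
    have hnp : n ≤ p := by omega
    rw [PySem.List.pyRange_one_eq_nil hnp]
    constructor
    · intro G hs _; rw [Sep_nil_of_ge hs hnp]; rfl
    · intro f e G' hpe hfe hen hs _
      have he : e = p := by omega
      rw [Sep_nil_of_ge hs (by omega), he]
      rfl
  | succ k ih =>
    intro p hk
    by_cases hp : p < n
    · have hpk : (n - (p + 1)).toNat ≤ k := by omega
      rw [PySem.List.pyRange_one_cons hp, List.map_cons]
      constructor
      · intro G hs hcov
        cases G with
        | nil =>
          have hcp : cov p = false := by
            have := hcov p le_rfl hp
            simp at this; simp [this]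
          simp only [scanRuns]
          rw [if_neg (by simp [hcp])]
          exact (ih (p + 1) hpk).1 [] trivial
            (fun j hj hjn => by simp [hcov j (by omega) hjn])
        | cons fe G' =>
          obtain ⟨hpf, hfe, hen, hsep⟩ := hs
          by_cases hpf' : p = fe.1
          · have hcp : cov p = true := by
              rw [hcov p le_rfl hp]
              exact ⟨fe, by simp, by omega, by omega⟩
            simp only [scanRuns]
            rw [if_pos hcp]
            have := (ih (p + 1) hpk).2 fe.1 fe.2 G' (by omega) hfe hen hsep
              (fun j hj hjn => by
                rw [hcov j (by omega) hjn]
                constructor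
                · rintro ⟨ge, hge, h1, h2⟩
                  rcases List.mem_cons.mp hge with rfl | hge
                  · exact Or.inl h2
                  · exact Or.inr ⟨ge, hge, h1, h2⟩
                · rintro (h | ⟨ge, hge, h1, h2⟩)
                  · exact ⟨fe, by simp, by omega, h⟩
                  · exact ⟨ge, by simp [hge], h1, h2⟩)
            rw [hpf'] at this ⊢
            simpa using this
          · have hcp : cov p = false := by
              rw [Bool.eq_false_iff]
              intro hc
              rcases (hcov p le_rfl hp).mp hc with ⟨ge, hge, h1, h2⟩
              rcases List.mem_cons.mp hge with rfl | hge
              · omega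
              · exact Sep_not_cov G' (fe.2 + 1) p hsep (by omega) ⟨ge, hge, h1, h2⟩
            simp only [scanRuns]
            rw [if_neg (by simp [hcp])]
            exact (ih (p + 1) hpk).1 (fe :: G')
              ⟨by omega, hfe, hen, hsep⟩
              (fun j hj hjn => hcov j (by omega) hjn)
      · intro f e G' hpe hfe hen hsep hcov
        by_cases hpe' : p < e
        · have hcp : cov p = true := by
            rw [hcov p le_rfl hp]; exact Or.inl hpe'
          simp only [scanRun]
          rw [if_pos hcp]
          exact (ih (p + 1) hpk).2 f e G' (by omega) hfe hen hsep
            (fun j hj hjn => hcov j (by omega) hjn)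
        · have hep : e = p := by omega
          have hcp : cov p = false := by
            rw [Bool.eq_false_iff]
            intro hc
            rcases (hcov p le_rfl hp).mp hc with h | h
            · omega
            · exact Sep_not_cov G' (e + 1) p hsep (by omega) h
          simp only [scanRun]
          rw [if_neg (by simp [hcp])]
          rw [hep]
          congr 1
          exact (ih (p + 1) hpk).1 G' (by rw [← hep]; exact Sep_mono (by omega) hsep)
            (fun j hj hjn => by
              rw [hcov j (by omega) hjn]
              constructor
              · rintro (h | h)
                · omega
                · exact h
              · exact Or.inr)
    · rw [PySem.List.pyRange_one_eq_nil (by omega)]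
      constructor
      · intro G hs _; rw [Sep_nil_of_ge hs (by omega)]; rfl
      · intro f e G' hpe hfe hen hsep _
        have he : e = p := by omega
        rw [Sep_nil_of_ge hsep (by omega), he]
        rfl

-- coveredAt characterized through the filtered start list
lemma coveredAt_iff (s : List Char) (m j : Int) (hj0 : 0 ≤ j) (hjn : j < (s.length : Int)) :
    (coveredAt s m j = true ↔
      ∃ i ∈ (PySem.List.pyRange 0 ((s.length : Int) - 11 + 1) 1).filter
          (fun i => decide (countMismatches (PySem.List.slice s (some i) (some (i + 11))) ≤ m)),
        i ≤ j ∧ j < i + 11) := by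
  unfold coveredAt
  rw [List.any_eq_true]
  constructor
  · rintro ⟨i, hi, hP⟩
    rw [PySem.List.mem_pyRange_one] at hi
    refine ⟨i, List.mem_filter.mpr ⟨PySem.List.mem_pyRange_one.mpr (by omega), hP⟩, by omega, by omega⟩
  · rintro ⟨i, hi, h1, h2⟩
    rcases List.mem_filter.mp hi with ⟨hmem, hP⟩
    rw [PySem.List.mem_pyRange_one] at hmem
    exact ⟨i, PySem.List.mem_pyRange_one.mpr (by omega), hP⟩

-- ===== VERDICT (by name: the statement is the Claim_ definition above) =====
theorem find_bbox_hits_spec : Claim_equal_find_bbox_hits := by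
  intro seq_str max_mismatches _
  unfold Spec_find_bbox_hits find_bbox_hits find_bbox_hits_alt
  simp only []
  set s := seq_str.toList with hs
  set n : Int := (s.length : Int) with hn
  set P : Int → Bool := fun i =>
    decide (countMismatches (PySem.List.slice s (some i) (some (i + 11))) ≤ max_mismatches) with hP
  set rng := PySem.List.pyRange 0 (n - 11 + 1) 1 with hrng
  have hhits : rng.foldl
      (fun acc i => if P i then acc ++ [(i, i + 11)] else acc) ([] : List (Int × Int))
      = [] ++ (rng.filter P).map (fun i => (i, i + 11)) :=
    PySem.List.foldl_append_if P (fun i => (i, i + 11)) rng []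
  rw [hhits]
  have hn0 : 0 ≤ n := by positivity
  set S := rng.filter P with hS
  have hpw : S.Pairwise (· < ·) :=
    (PySem.List.pairwise_lt_pyRange_one 0 (n - 11 + 1)).filter P
  have hSmem : ∀ x ∈ S, 0 ≤ x ∧ x + 11 ≤ n := by
    intro x hx
    have := (List.mem_filter.mp hx).1
    rw [hrng, PySem.List.mem_pyRange_one] at this
    omega
  have hcov : ∀ j, 0 ≤ j → j < n →
      (coveredAt s max_mismatches j = true ↔ ∃ i ∈ S, i ≤ j ∧ j < i + 11) := by
    intro j h0 h1
    exact coveredAt_iff s max_mismatches j h0 h1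
  cases hst : S with
  | nil =>
    rw [hst] at hcov
    simp only [List.map_nil]
    symm
    exact (scan_main n (coveredAt s max_mismatches) n.toNat 0 (by omega)).1 [] trivial
      (fun j hj hjn => by simp [hcov j hj hjn])
  | cons s0 rest =>
    rw [hst] at hpw hSmem hcov
    have hall : ∀ x ∈ rest, s0 < x := fun x hx => (List.pairwise_cons.mp hpw).1 x hx
    have hpw' : rest.Pairwise (· < ·) := (List.pairwise_cons.mp hpw).2
    have hs0 := hSmem s0 (by simp)
    have hrest : ∀ x ∈ rest, s0 < x ∧ x + 11 ≤ n := fun x hx =>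
      ⟨hall x hx, (hSmem x (by simp [hx])).2⟩
    simp only [List.map_cons, List.nil_append]
    have hA : ((rest.map (fun i => (i, i + 11))).foldl mergeStepA
        [(s0, s0 + 11)]).reverse = groupsGo s0 s0 rest := by
      have := mergeA_eq_groupsGo rest s0 s0 [] hall hpw'
      simpa using this
    rw [hA]
    symm
    refine (scan_main n (coveredAt s max_mismatches) n.toNat 0 (by omega)).1
      (groupsGo s0 s0 rest)
      (Sep_mono hs0.1 (groupsGo_sep n rest s0 s0 le_rfl (by omega) hrest hpw'))
      (fun j hj hjn => ?_)
    rw [hcov j hj hjn, covG_groupsGo rest s0 s0 j le_rfl hall hpw']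
    constructor
    · rintro ⟨i, hi, h1, h2⟩
      rcases List.mem_cons.mp hi with rfl | hi
      · exact Or.inl ⟨h1, h2⟩
      · exact Or.inr ⟨i, hi, h1, h2⟩
    · rintro (h | ⟨i, hi, h1, h2⟩)
      · exact ⟨s0, by simp, h.1, h.2⟩
      · exact ⟨i, by simp [hi], h1, h2⟩
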